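-- pv_equiv track=rewrite | github.com/sburdges-eng/KmiDi | KmiDi_BACKUP/project/source/python/music_brain/generative/music_utils.py | get_scale_notes
-- ===== SOURCE A (Python) =====
-- from typing import List, Dict, Optional, Tuple
--
-- ENHARMONIC_MAP = {
--     "C#": "Db", "D#": "Eb", "F#": "Gb", "G#": "Ab", "A#": "Bb",
--     "Cb": "B", "Fb": "E", "E#": "F", "B#": "C"
-- }
--
-- NOTE_TO_PITCH_CLASS = {
--     "C": 0, "C#": 1, "Db": 1, "D": 2, "D#": 3, "Eb": 3,
--     "E": 4, "Fb": 4, "E#": 5, "F": 5, "F#": 6, "Gb": 6,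
--     "G": 7, "G#": 8, "Ab": 8, "A": 9, "A#": 10, "Bb": 10,
--     "B": 11, "Cb": 11, "B#": 0
-- }
--
-- SCALE_INTERVALS = {
--     "major": [0, 2, 4, 5, 7, 9, 11],
--     "minor": [0, 2, 3, 5, 7, 8, 10],
--     "dorian": [0, 2, 3, 5, 7, 9, 10],
--     "phrygian": [0, 1, 3, 5, 7, 8, 10],
--     "lydian": [0, 2, 4, 6, 7, 9, 11],
--     "mixolydian": [0, 2, 4, 5, 7, 9, 10],
--     "locrian": [0, 1, 3, 5, 6, 8, 10],
--     "harmonic_minor": [0, 2, 3, 5, 7, 8, 11],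
--     "melodic_minor": [0, 2, 3, 5, 7, 9, 11],
--     "pentatonic_major": [0, 2, 4, 7, 9],
--     "pentatonic_minor": [0, 3, 5, 7, 10],
--     "blues": [0, 3, 5, 6, 7, 10],
--     "chromatic": list(range(12)),
-- }
--
-- def note_to_midi(note: str, octave: int = 4) -> int:
--     """
--     Convert a note name to MIDI note number.
--
--     Args:
--         note: Note name (e.g., "C", "F#", "Bb")
--         octave: Octave number (4 = middle octave, C4 = MIDI 60)
--
--     Returns:
--         MIDI note number (0-127)
--
--     Examples:
--         >>> note_to_midi("C", 4)
--         60
--         >>> note_to_midi("A", 4)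
--         69
--         >>> note_to_midi("C", 2)
--         36
--     """
--     # Parse note name
--     if len(note) > 1 and note[1] in "#b":
--         base = note[:2]
--     else:
--         base = note[0]
--
--     # Handle enharmonic equivalents
--     base = ENHARMONIC_MAP.get(base, base)
--
--     pitch_class = NOTE_TO_PITCH_CLASS.get(base, 0)
--     return 12 * (octave + 1) + pitch_class
--
-- def get_scale_notes(root: str, scale: str = "major", octave: int = 4, num_octaves: int = 2) -> List[int]:
--     """
--     Get MIDI note numbers for a scale.
--
--     Args:
--         root: Root note name
--         scale: Scale type (major, minor, dorian, etc.)
--         octave: Starting octave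
--         num_octaves: Number of octaves to generate
--
--     Returns:
--         List of MIDI note numbers in the scale
--     """
--     root_midi = note_to_midi(root, octave)
--     intervals = SCALE_INTERVALS.get(scale.lower(), SCALE_INTERVALS["major"])
--
--     notes = []
--     for oct_offset in range(num_octaves):
--         for interval in intervals:
--             note = root_midi + oct_offset * 12 + interval
--             if 0 <= note <= 127:
--                 notes.append(note)
--
--     return sorted(set(notes))
-- ===== SOURCE B (Python) =====
-- _SCALE_MASKS = {
--     "major": 2741, "minor": 1453, "dorian": 1709, "phrygian": 1451,
--     "lydian": 2773, "mixolydian": 1717, "locrian": 1387,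
--     "harmonic_minor": 2477, "melodic_minor": 2733,
--     "pentatonic_major": 661, "pentatonic_minor": 1193,
--     "blues": 1257, "chromatic": 4095,
-- }
--
-- _LETTER_PCS = (0, 2, 4, 5, 7, 9, 11)
--
-- def _note_pc(note):
--     i = "CDEFGAB".find(note[0])
--     if i < 0:
--         return 0
--     pc = _LETTER_PCS[i]
--     if len(note) > 1:
--         if note[1] == '#':
--             pc = (pc + 1) % 12
--         elif note[1] == 'b':
--             pc = (pc - 1) % 12
--     return pc
--
-- def get_scale_notes(root, scale="major", octave=4, num_octaves=2):
--     root_midi = 12 * (octave + 1) + _note_pc(root)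
--     mask = _SCALE_MASKS.get(scale.lower(), 2741)
--     return [n for n in range(root_midi, root_midi + 12 * num_octaves)
--             if (mask >> ((n - root_midi) % 12)) & 1 and 0 <= n <= 127]
-- ===== Notes on version B (the rewrite author's own statement) =====
-- stated objective: alternative
-- what changed: replaces the note/interval lookup dictionaries and the nested octave-by-interval enumeration followed by sorted(set(...)) with letter-position arithmetic for the pitch class, a 12-bit mask per scale, and a single bit-test-filtered scan over the contiguous MIDI range, whose output is already sorted and duplicate-free
-- outside the precondition, e.g. on get_scale_notes('', 'major', 4, 2): A raises IndexError, B raises IndexError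
import Mathlib
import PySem

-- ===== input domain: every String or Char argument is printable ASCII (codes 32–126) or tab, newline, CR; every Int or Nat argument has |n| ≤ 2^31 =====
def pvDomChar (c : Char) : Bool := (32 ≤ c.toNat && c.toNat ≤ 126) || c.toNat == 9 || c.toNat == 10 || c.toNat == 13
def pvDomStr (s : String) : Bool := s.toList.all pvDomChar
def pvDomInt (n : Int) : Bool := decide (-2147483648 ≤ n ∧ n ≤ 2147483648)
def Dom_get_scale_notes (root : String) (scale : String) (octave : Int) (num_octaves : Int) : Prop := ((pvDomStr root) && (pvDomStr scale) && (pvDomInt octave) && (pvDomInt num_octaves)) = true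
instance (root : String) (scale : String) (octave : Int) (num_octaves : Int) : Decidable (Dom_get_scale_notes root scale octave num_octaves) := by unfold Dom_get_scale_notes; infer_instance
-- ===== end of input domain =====

-- B replaces A's note/interval dictionaries and nested octave×interval loops + sorted(set(...))
-- by letter-arithmetic for the pitch class, a 12-bit mask per scale, and one bit-test-filtered
-- scan over the contiguous MIDI range; same return value on every input where A returns.

-- ===== PORT A =====
-- module-level constants of the original Python module (used only by A)
def pvEnharmonicMap : PySem.Dict String String := PySem.Dict.ofList
  [("C#","Db"), ("D#","Eb"), ("F#","Gb"), ("G#","Ab"), ("A#","Bb"),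
   ("Cb","B"), ("Fb","E"), ("E#","F"), ("B#","C")]

def pvNoteToPitchClass : PySem.Dict String Int := PySem.Dict.ofList
  [("C",0), ("C#",1), ("Db",1), ("D",2), ("D#",3), ("Eb",3),
   ("E",4), ("Fb",4), ("E#",5), ("F",5), ("F#",6), ("Gb",6),
   ("G",7), ("G#",8), ("Ab",8), ("A",9), ("A#",10), ("Bb",10),
   ("B",11), ("Cb",11), ("B#",0)]

def pvScaleIntervals : PySem.Dict String (List Int) := PySem.Dict.ofList
  [("major",[0, 2, 4, 5, 7, 9, 11]),
   ("minor",[0, 2, 3, 5, 7, 8, 10]),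
   ("dorian",[0, 2, 3, 5, 7, 9, 10]),
   ("phrygian",[0, 1, 3, 5, 7, 8, 10]),
   ("lydian",[0, 2, 4, 6, 7, 9, 11]),
   ("mixolydian",[0, 2, 4, 5, 7, 9, 10]),
   ("locrian",[0, 1, 3, 5, 6, 8, 10]),
   ("harmonic_minor",[0, 2, 3, 5, 7, 8, 11]),
   ("melodic_minor",[0, 2, 3, 5, 7, 9, 11]),
   ("pentatonic_major",[0, 2, 4, 7, 9]),
   ("pentatonic_minor",[0, 3, 5, 7, 10]),
   ("blues",[0, 3, 5, 6, 7, 10]),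
   ("chromatic",[0, 1, 2, 3, 4, 5, 6, 7, 8, 9, 10, 11])]

-- A's helper note_to_midi; exact for note ≠ "" (note[0] raises there, excluded by Pre_);
-- note[1] in "#b" is exact as char membership in ['#','b'] since both are single chars
def note_to_midi (note : String) (octave : Int) : Int :=
  let cs := note.toList
  let base : String :=
    if 1 < cs.length ∧ cs.getD 1 ' ' ∈ ['#', 'b'] then String.ofList (cs.take 2)
    else String.ofList (cs.take 1)
  let base := pvEnharmonicMap.getD base base
  let pitch_class := pvNoteToPitchClass.getD base 0
  12 * (octave + 1) + pitch_class

def get_scale_notes (root : String) (scale : String) (octave : Int) (num_octaves : Int) : List Int :=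
  let root_midi := note_to_midi root octave
  let intervals := pvScaleIntervals.getD (PySem.Str.lower scale) [0, 2, 4, 5, 7, 9, 11]
  let notes := (PySem.List.pyRange 0 num_octaves 1).foldl (fun acc oct_offset =>
      intervals.foldl (fun acc interval =>
        let note := root_midi + oct_offset * 12 + interval
        if 0 ≤ note ∧ note ≤ 127 then acc ++ [note] else acc) acc) []
  PySem.List.sorted (PySem.Set.ofList notes) (fun x => x) false

-- ===== PORT B =====
-- B's constants: one 12-bit mask per scale, pitch classes of the seven letters
def pvScaleMasks : PySem.Dict String Nat := PySem.Dict.ofList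
  [("major",2741), ("minor",1453), ("dorian",1709), ("phrygian",1451),
   ("lydian",2773), ("mixolydian",1717), ("locrian",1387),
   ("harmonic_minor",2477), ("melodic_minor",2733),
   ("pentatonic_major",661), ("pentatonic_minor",1193),
   ("blues",1257), ("chromatic",4095)]

def pvLetterPcs : List Int := [0, 2, 4, 5, 7, 9, 11]

-- B's helper _note_pc; exact for note ≠ "" (note[0] raises there, excluded by Pre_)
def pvNotePc (note : String) : Int :=
  let cs := note.toList
  let i := PySem.Chars.find ['C','D','E','F','G','A','B'] [cs.headD ' ']
  if i < 0 then 0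
  else
    let pc := PySem.List.pyGetD pvLetterPcs i 0
    if 1 < cs.length then
      if cs.getD 1 ' ' = '#' then PySem.Int.mod (pc + 1) 12
      else if cs.getD 1 ' ' = 'b' then PySem.Int.mod (pc - 1) 12
      else pc
    else pc

def get_scale_notes_alt (root : String) (scale : String) (octave : Int) (num_octaves : Int) : List Int :=
  let root_midi := 12 * (octave + 1) + pvNotePc root
  let mask := pvScaleMasks.getD (PySem.Str.lower scale) 2741
  (PySem.List.pyRange root_midi (root_midi + 12 * num_octaves) 1).filter
    (fun n => ((mask >>> (PySem.Int.mod (n - root_midi) 12).toNat) &&& 1 != 0)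
              && decide (0 ≤ n) && decide (n ≤ 127))

-- ===== PRECONDITION & SPEC =====
-- Pre_ excludes only root = "", where Python A raises IndexError at note[0].
def Pre_get_scale_notes (root : String) (scale : String) (octave : Int) (num_octaves : Int) : Prop := root ≠ ""
instance (root : String) (scale : String) (octave : Int) (num_octaves : Int) : Decidable (Pre_get_scale_notes root scale octave num_octaves) := by unfold Pre_get_scale_notes; infer_instance
def pvWitness_get_scale_notes : String × String × Int × Int := ("C", "major", 4, 2)

def Spec_get_scale_notes (root : String) (scale : String) (octave : Int) (num_octaves : Int) (out : List Int) : Prop := out = get_scale_notes_alt root scale octave num_octaves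
instance (root : String) (scale : String) (octave : Int) (num_octaves : Int) (out : List Int) : Decidable (Spec_get_scale_notes root scale octave num_octaves out) := by unfold Spec_get_scale_notes; infer_instance

-- ===== CLAIM (what is proved, stated in full; the proofs are below) =====
def Claim_equal_get_scale_notes : Prop := ∀ (root : String) (scale : String) (octave : Int) (num_octaves : Int), Dom_get_scale_notes root scale octave num_octaves → Pre_get_scale_notes root scale octave num_octaves → Spec_get_scale_notes root scale octave num_octaves (get_scale_notes root scale octave num_octaves)

-- ===== LEMMAS AND PROOFS =====

-- ---- the two pitch-class computations agree ----

-- A's pitch class, written as a standalone term (definitionally the pitch part of note_to_midi)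
def pvPcA (note : String) : Int :=
  let cs := note.toList
  let base : String :=
    if 1 < cs.length ∧ cs.getD 1 ' ' ∈ ['#', 'b'] then String.ofList (cs.take 2)
    else String.ofList (cs.take 1)
  let base := pvEnharmonicMap.getD base base
  pvNoteToPitchClass.getD base 0

lemma get?_none_of_head {β : Type} (s : String) (l : List (String × β))
    (h : ∀ p ∈ l, p.1.toList.head? ≠ s.toList.head?) :
    (PySem.Dict.mk l).get? s = none := by
  induction l with
  | nil => rfl
  | cons p t ih =>
    obtain ⟨k, v⟩ := p
    rw [PySem.Dict.get?_mk_cons]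
    rw [if_neg]
    · exact ih (fun q hq => h q (List.mem_cons_of_mem _ hq))
    · intro hk
      exact h (k, v) List.mem_cons_self (by rw [eq_of_beq hk])

lemma getD_of_get?_none {β : Type} (d : PySem.Dict String β) (k : String) (dflt : β)
    (h : d.get? k = none) : d.getD k dflt = dflt := by
  simp [PySem.Dict.getD, h]

lemma pitch_get?_none (c : Char) (h1 : c ≠ 'C') (h2 : c ≠ 'D') (h3 : c ≠ 'E') (h4 : c ≠ 'F')
    (h5 : c ≠ 'G') (h6 : c ≠ 'A') (h7 : c ≠ 'B') (s : String) (hs : s.toList.head? = some c) :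
    pvNoteToPitchClass.get? s = none := by
  have e : pvNoteToPitchClass = PySem.Dict.mk
    [("C",0), ("C#",1), ("Db",1), ("D",2), ("D#",3), ("Eb",3),
     ("E",4), ("Fb",4), ("E#",5), ("F",5), ("F#",6), ("Gb",6),
     ("G",7), ("G#",8), ("Ab",8), ("A",9), ("A#",10), ("Bb",10),
     ("B",11), ("Cb",11), ("B#",0)] := by decide
  rw [e]
  apply get?_none_of_head
  intro p hp
  rw [hs]
  fin_cases hp <;> simp <;>
    first
      | exact fun he => h1 he.symm
      | exact fun he => h2 he.symm
      | exact fun he => h3 he.symm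
      | exact fun he => h4 he.symm
      | exact fun he => h5 he.symm
      | exact fun he => h6 he.symm
      | exact fun he => h7 he.symm

lemma enharm_get?_none (c : Char) (h1 : c ≠ 'C') (h2 : c ≠ 'D') (h3 : c ≠ 'E') (h4 : c ≠ 'F')
    (h5 : c ≠ 'G') (h6 : c ≠ 'A') (h7 : c ≠ 'B') (s : String) (hs : s.toList.head? = some c) :
    pvEnharmonicMap.get? s = none := by
  have e : pvEnharmonicMap = PySem.Dict.mk
    [("C#","Db"), ("D#","Eb"), ("F#","Gb"), ("G#","Ab"), ("A#","Bb"),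
     ("Cb","B"), ("Fb","E"), ("E#","F"), ("B#","C")] := by decide
  rw [e]
  apply get?_none_of_head
  intro p hp
  rw [hs]
  fin_cases hp <;> simp <;>
    first
      | exact fun he => h1 he.symm
      | exact fun he => h2 he.symm
      | exact fun he => h3 he.symm
      | exact fun he => h4 he.symm
      | exact fun he => h5 he.symm
      | exact fun he => h6 he.symm
      | exact fun he => h7 he.symm

-- for a non-letter first character A's pitch class is 0
lemma pvPcA_nonletter (note : String) (c : Char) (rest : List Char)
    (hcs : note.toList = c :: rest)
    (h1 : c ≠ 'C') (h2 : c ≠ 'D') (h3 : c ≠ 'E') (h4 : c ≠ 'F')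
    (h5 : c ≠ 'G') (h6 : c ≠ 'A') (h7 : c ≠ 'B') : pvPcA note = 0 := by
  have key : ∀ l : List Char,
      pvNoteToPitchClass.getD (pvEnharmonicMap.getD (String.ofList (c :: l))
        (String.ofList (c :: l))) 0 = 0 := by
    intro l
    have hhead : (String.ofList (c :: l)).toList.head? = some c := by simp
    rw [getD_of_get?_none _ _ _ (enharm_get?_none c h1 h2 h3 h4 h5 h6 h7 _ hhead)]
    rw [getD_of_get?_none _ _ _ (pitch_get?_none c h1 h2 h3 h4 h5 h6 h7 _ hhead)]
  unfold pvPcA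
  simp only [hcs]
  split_ifs with hcond
  · rw [show (c :: rest).take 2 = c :: rest.take 1 by simp, key]
  · rw [show (c :: rest).take 1 = c :: rest.take 0 by simp, key]

lemma pc_eq (note : String) (h : note ≠ "") : pvPcA note = pvNotePc note := by
  obtain ⟨c, rest, hcs⟩ : ∃ c rest, note.toList = c :: rest := by
    cases hx : note.toList with
    | nil => exact absurd (by cases note; simp_all) h
    | cons a l => exact ⟨a, l, rfl⟩
  by_cases hc : c ∈ ['C','D','E','F','G','A','B']
  · -- letter head: finitely many concrete cases
    unfold pvPcA pvNotePc
    simp only [hcs, List.headD_cons]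
    cases rest with
    | nil =>
      fin_cases hc <;> decide
    | cons c1 r =>
      have hlen : (1 : Nat) < (c :: c1 :: r).length := by simp
      have hget : (c :: c1 :: r).getD 1 ' ' = c1 := by rfl
      have htake2 : (c :: c1 :: r).take 2 = [c, c1] := by simp
      have htake1 : (c :: c1 :: r).take 1 = [c] := by simp
      simp only [hlen, hget, htake2, htake1, true_and, if_pos]
      by_cases h1 : c1 = '#'
      · subst h1; fin_cases hc <;> decide
      · by_cases h2 : c1 = 'b'
        · subst h2; fin_cases hc <;> decide
        · have hmem : c1 ∉ ['#', 'b'] := by simp [h1, h2]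
          rw [if_neg (by simp [hmem]), if_neg h1, if_neg h2]
          fin_cases hc <;> decide
  · simp only [List.mem_cons, List.not_mem_nil, or_false] at hc
    push Not at hc
    obtain ⟨h1, h2, h3, h4, h5, h6, h7⟩ := hc
    rw [pvPcA_nonletter note c rest hcs h1 h2 h3 h4 h5 h6 h7]
    unfold pvNotePc
    simp only [hcs, List.headD_cons]
    have hfind : PySem.Chars.find ['C','D','E','F','G','A','B'] [c] = -1 := by
      rw [show PySem.Chars.find ['C','D','E','F','G','A','B'] [c]
            = PySem.Str.find (String.ofList ['C','D','E','F','G','A','B']) (String.ofList [c]) from by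
          simp [PySem.Str.find]]
      rw [PySem.Str.find_eq_neg_one_iff]
      simp [List.singleton_infix_iff, h1, h2, h3, h4, h5, h6, h7]
    rw [hfind, if_pos (by norm_num : (-1 : Int) < 0)]

-- ---- the interval list and the bit mask agree, scale by scale ----

-- I and m describe the same subset of 0..11
def pvPair (I : List Int) (m : Nat) : Prop :=
  ∀ k : Nat, k < 12 → (((m >>> k) &&& 1 != 0) = I.contains (k : Int))

-- the interval lookup's result is 'good': it equals the members of range(12) it contains
def pvGood (I : List Int) : Prop :=
  (PySem.List.pyRange 0 12 1).filter (fun m => I.contains m) = I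

lemma getD_parallel {β γ : Type} (P : β → γ → Prop) (s : String) :
    ∀ (l : List (String × β × γ)) (db : β) (dc : γ),
    (∀ t ∈ l, P t.2.1 t.2.2) → P db dc →
    P (((PySem.Dict.mk (l.map fun t => (t.1, t.2.1))).get? s).getD db)
      (((PySem.Dict.mk (l.map fun t => (t.1, t.2.2))).get? s).getD dc) := by
  intro l
  induction l with
  | nil => intro db dc _ hd; exact hd
  | cons t rest ih =>
    intro db dc hmem hd
    simp only [List.map_cons, PySem.Dict.get?_mk_cons]
    split_ifs with hk
    · simpa using hmem t List.mem_cons_self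
    · exact ih db dc (fun q hq => hmem q (List.mem_cons_of_mem _ hq)) hd

def pvScaleData : List (String × List Int × Nat) :=
  [("major",[0, 2, 4, 5, 7, 9, 11],2741), ("minor",[0, 2, 3, 5, 7, 8, 10],1453),
   ("dorian",[0, 2, 3, 5, 7, 9, 10],1709), ("phrygian",[0, 1, 3, 5, 7, 8, 10],1451),
   ("lydian",[0, 2, 4, 6, 7, 9, 11],2773), ("mixolydian",[0, 2, 4, 5, 7, 9, 10],1717),
   ("locrian",[0, 1, 3, 5, 6, 8, 10],1387), ("harmonic_minor",[0, 2, 3, 5, 7, 8, 11],2477),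
   ("melodic_minor",[0, 2, 3, 5, 7, 9, 11],2733), ("pentatonic_major",[0, 2, 4, 7, 9],661),
   ("pentatonic_minor",[0, 3, 5, 7, 10],1193), ("blues",[0, 3, 5, 6, 7, 10],1257),
   ("chromatic",[0, 1, 2, 3, 4, 5, 6, 7, 8, 9, 10, 11],4095)]

lemma scale_lookup (s : String) :
    pvGood (pvScaleIntervals.getD s [0, 2, 4, 5, 7, 9, 11]) ∧
    pvPair (pvScaleIntervals.getD s [0, 2, 4, 5, 7, 9, 11]) (pvScaleMasks.getD s 2741) := by
  have hI : pvScaleIntervals = PySem.Dict.mk (pvScaleData.map fun t => (t.1, t.2.1)) := by decide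
  have hM : pvScaleMasks = PySem.Dict.mk (pvScaleData.map fun t => (t.1, t.2.2)) := by decide
  rw [hI, hM]
  show (pvGood ((_ : Option (List Int)).getD _) ∧ pvPair ((_ : Option (List Int)).getD _) ((_ : Option Nat).getD _))
  exact getD_parallel (fun I m => pvGood I ∧ pvPair I m) s pvScaleData _ _
    (by intro t ht; fin_cases ht <;>
        exact ⟨by unfold pvGood; decide, by unfold pvPair; decide⟩)
    ⟨by unfold pvGood; decide, by unfold pvPair; decide⟩

-- ---- the range scan with bit test equals A's nested loops after sorted(set(...)) ----

lemma pyRange_shift (b a : Int) :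
    PySem.List.pyRange b (b + a) 1 = (PySem.List.pyRange 0 a 1).map (fun k => b + k) := by
  rw [PySem.List.pyRange_one, PySem.List.pyRange_one]
  have h : b + a - b = a := by ring
  rw [h, List.map_map]
  simp

lemma block_eq (r o : Int) (I : List Int) (hI : pvGood I) :
    (PySem.List.pyRange (r + 12*o) (r + 12*o + 12) 1).filter
      (fun n => I.contains (PySem.Int.mod (n - r) 12) && decide (0 ≤ n) && decide (n ≤ 127))
    = (I.map (fun i => r + o * 12 + i)).filter (fun n => decide (0 ≤ n) && decide (n ≤ 127)) := by
  rw [pyRange_shift (r + 12*o) 12, List.filter_map]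
  have hfun : (fun i => r + o * 12 + i) = (fun k : Int => r + 12*o + k) := by
    funext i; ring
  rw [hfun, List.filter_map]
  have hcong : (PySem.List.pyRange 0 12 1).filter
      ((fun n => I.contains (PySem.Int.mod (n - r) 12) && decide (0 ≤ n) && decide (n ≤ 127)) ∘ (fun k => r + 12*o + k))
      = ((PySem.List.pyRange 0 12 1).filter (fun m => I.contains m)).filter
          ((fun n => decide (0 ≤ n) && decide (n ≤ 127)) ∘ (fun k => r + 12*o + k)) := by
    rw [List.filter_filter]
    apply List.filter_congr
    intro k hk
    obtain ⟨hk0, hk12⟩ := (PySem.List.mem_pyRange_one).mp hk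
    have hmod : PySem.Int.mod (r + 12*o + k - r) 12 = k := by
      rw [PySem.Int.mod_eq_emod_of_pos (by norm_num)]
      omega
    simp only [Function.comp, hmod]
    simp [Bool.and_comm, Bool.and_assoc]
  rw [hcong, hI]

lemma range_split (r : Int) : ∀ (n : Nat),
    PySem.List.pyRange r (r + 12 * (n : Int)) 1 =
    (PySem.List.pyRange 0 (n : Int) 1).flatMap (fun o => PySem.List.pyRange (r + 12 * o) (r + 12 * o + 12) 1) := by
  intro n
  induction n with
  | zero => simp [PySem.List.pyRange_one_eq_nil]
  | succ m ih =>
    rw [show ((m+1 : Nat) : Int) = (m : Int) + 1 by push_cast; ring]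
    rw [PySem.List.pyRange_one_succ_right (by positivity)]
    rw [List.flatMap_append]
    rw [show r + 12 * ((m:Int)+1) = (r + 12*(m:Int)) + 12 by ring]
    rw [PySem.List.pyRange_one_append r (r + 12*(m:Int)) (r + 12*(m:Int) + 12) (by omega) (by omega)]
    simp [ih]

lemma filter_flatMap_comm (l : List Int) (g : Int → List Int) (p : Int → Bool) :
    (l.flatMap g).filter p = l.flatMap (fun x => (g x).filter p) := by
  induction l with
  | nil => simp
  | cons a t ih => simp [List.flatMap_cons, List.filter_append, ih]

lemma main_lemma (r k : Int) (I : List Int) (hI : pvGood I) :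
    (PySem.List.pyRange 0 k 1).foldl (fun acc o =>
        I.foldl (fun acc i =>
          let note := r + o * 12 + i
          if 0 ≤ note ∧ note ≤ 127 then acc ++ [note] else acc) acc) [] =
    (PySem.List.pyRange r (r + 12 * k) 1).filter
      (fun n => I.contains (PySem.Int.mod (n - r) 12)
                && decide (0 ≤ n) && decide (n ≤ 127)) := by
  have hinner : ∀ (o : Int) (acc : List Int),
      I.foldl (fun acc i =>
        let note := r + o * 12 + i
        if 0 ≤ note ∧ note ≤ 127 then acc ++ [note] else acc) acc
      = acc ++ (I.map (fun i => r + o * 12 + i)).filter (fun n => decide (0 ≤ n) && decide (n ≤ 127)) := by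
    intro o acc
    simp only []
    rw [PySem.List.foldl_append_ite (p := fun i => 0 ≤ r + o * 12 + i ∧ r + o * 12 + i ≤ 127)
        (f := fun i => r + o * 12 + i)]
    rw [List.filter_map]
    congr 1
    congr 1
    apply List.filter_congr
    intro i _
    simp [Function.comp]
  simp only [hinner]
  rw [PySem.List.foldl_append_eq_flatMap]
  rw [List.nil_append]
  by_cases hk : k ≤ 0
  · rw [PySem.List.pyRange_one_eq_nil hk, PySem.List.pyRange_one_eq_nil (by omega)]
    simp
  · have hkn : k = ((k.toNat : Nat) : Int) := by omega
    rw [hkn, range_split, filter_flatMap_comm]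
    have hb : ∀ o : Int,
        (PySem.List.pyRange (r + 12*o) (r + 12*o + 12) 1).filter
          (fun n => I.contains (PySem.Int.mod (n - r) 12) && decide (0 ≤ n) && decide (n ≤ 127))
        = (I.map (fun i => r + o * 12 + i)).filter (fun n => decide (0 ≤ n) && decide (n ≤ 127)) :=
      fun o => block_eq r o I hI
    simp only [hb]

lemma notes_sorted_set (r k : Int) (I : List Int) :
    PySem.List.sorted (PySem.Set.ofList ((PySem.List.pyRange r (r + 12 * k) 1).filter
      (fun n => I.contains (PySem.Int.mod (n - r) 12) && decide (0 ≤ n) && decide (n ≤ 127))))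
      (fun x => x) false =
    (PySem.List.pyRange r (r + 12 * k) 1).filter
      (fun n => I.contains (PySem.Int.mod (n - r) 12) && decide (0 ≤ n) && decide (n ≤ 127)) := by
  have hpw : ((PySem.List.pyRange r (r + 12 * k) 1).filter
      (fun n => I.contains (PySem.Int.mod (n - r) 12) && decide (0 ≤ n) && decide (n ≤ 127))).Pairwise (· < ·) :=
    (PySem.List.pairwise_lt_pyRange_one r (r + 12 * k)).filter _
  have hnd : ((PySem.List.pyRange r (r + 12 * k) 1).filter
      (fun n => I.contains (PySem.Int.mod (n - r) 12) && decide (0 ≤ n) && decide (n ≤ 127))).Nodup :=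
    hpw.imp (fun h => ne_of_lt h)
  rw [PySem.Set.ofList_eq_self_of_nodup _ hnd]
  exact PySem.List.sorted_eq_self_of_pairwise _ _ (hpw.imp (fun h => le_of_lt h))

-- B's bit-test predicate coincides with the contains-form predicate
lemma predB_eq (I : List Int) (m : Nat) (hp : pvPair I m) (r n : Int) :
    (((m >>> (PySem.Int.mod (n - r) 12).toNat) &&& 1 != 0)
      && decide (0 ≤ n) && decide (n ≤ 127))
    = (I.contains (PySem.Int.mod (n - r) 12) && decide (0 ≤ n) && decide (n ≤ 127)) := by
  have h0 : 0 ≤ PySem.Int.mod (n - r) 12 := PySem.Int.mod_nonneg _ (by norm_num)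
  have h1 : PySem.Int.mod (n - r) 12 < 12 := PySem.Int.mod_lt _ (by norm_num)
  have hcast : ((PySem.Int.mod (n - r) 12).toNat : Int) = PySem.Int.mod (n - r) 12 := by omega
  have := hp (PySem.Int.mod (n - r) 12).toNat (by omega)
  rw [hcast] at this
  rw [this]

-- ===== VERDICT (by name: the statement is the Claim_ definition above) =====
theorem get_scale_notes_spec : Claim_equal_get_scale_notes := by
  intro root scale octave num_octaves _hD hP
  unfold Spec_get_scale_notes get_scale_notes get_scale_notes_alt
  obtain ⟨hGood, hPair⟩ := scale_lookup (PySem.Str.lower scale)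
  have hroot : note_to_midi root octave = 12 * (octave + 1) + pvNotePc root := by
    rw [show note_to_midi root octave = 12 * (octave + 1) + pvPcA root from rfl,
        pc_eq root hP]
  rw [hroot]
  simp only [predB_eq _ _ hPair]
  rw [main_lemma (12 * (octave + 1) + pvNotePc root) num_octaves
      (pvScaleIntervals.getD (PySem.Str.lower scale) [0, 2, 4, 5, 7, 9, 11]) hGood]
  exact notes_sorted_set _ _ _
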